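-- pv_equiv track=rewrite | github.com/fjennison22/project03 | ebay-dl.py | parse_shipping
-- ===== SOURCE A (Python) =====
-- def parse_shipping(text):
--
--     '''
--     >>> parse_shipping('Free shipping')
--     0
--     >>> parse_shipping('+$10.60 shipping')
--     1060
--     >>> parse_shipping('+$5.99 shipping')
--     599
--     '''
--     price=''
--     if text[0]=='+':
--         for p in text:
--             if p in '1234567890':
--                 price+=p
--             elif p==' ':
--                 break
--         return int(price)
--     else:
--         return 0
-- ===== SOURCE B (Python) =====
-- def parse_shipping(text):
--     if not text.startswith('+'):
--         return 0
--     head = text.split(' ', 1)[0]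
--     cents = 0
--     place = 1
--     for c in reversed(head):
--         if c in '0123456789':
--             cents += (ord(c) - ord('0')) * place
--             place *= 10
--     return cents
-- ===== Notes on version B (the rewrite author's own statement) =====
-- stated objective: alternative
-- what changed: Replaces A's forward scan that builds a digit string and parses it with int() by a reversed scan over the pre-space token that accumulates the value arithmetically with a running place-value multiplier (digit*1, *10, *100, ...), never constructing or parsing a string.
-- outside the precondition, e.g. on parse_shipping(''): A raises IndexError, B returns 0; on parse_shipping('+'): A raises ValueError, B returns 0
import Mathlib
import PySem

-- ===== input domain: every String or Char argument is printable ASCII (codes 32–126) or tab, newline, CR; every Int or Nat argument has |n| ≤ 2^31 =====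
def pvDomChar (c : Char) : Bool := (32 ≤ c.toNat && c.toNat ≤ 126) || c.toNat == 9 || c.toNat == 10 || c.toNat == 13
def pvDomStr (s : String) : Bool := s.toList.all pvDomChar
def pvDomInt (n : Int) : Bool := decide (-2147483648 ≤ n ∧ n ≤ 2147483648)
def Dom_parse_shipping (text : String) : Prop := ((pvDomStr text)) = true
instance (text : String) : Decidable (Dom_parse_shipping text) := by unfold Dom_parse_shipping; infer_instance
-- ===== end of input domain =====

-- B replaces A's forward build-a-digit-string-then-int() scan by a reversed scan of the pre-space token accumulating the value arithmetically with a place-value multiplier (objective: alternative).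


-- ===== PORT A =====
-- the for-loop: digit chars are appended to price, the first space breaks
def pvALoop : List Char → List Char → List Char
  | acc, [] => acc
  | acc, c :: rest =>
      if c ∈ "1234567890".toList then pvALoop (acc ++ [c]) rest
      else if c = ' ' then acc
      else pvALoop acc rest

-- int(price) where price consists only of chars '0'-'9' (the only strings A feeds it):
-- exact there — ValueError (none) iff empty, else plain decimal conversion
def pvInt? (ds : List Char) : Option Int :=
  if ds = [] then none
  else some (ds.foldl (fun a c => a * 10 + ((c.toNat : Int) - 48)) 0)

def parse_shipping (text : String) : Int :=
  match PySem.Str.pyGet? text 0 with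
  | none => 0   -- text[0] raises IndexError on empty text; excluded by Pre_
  | some c =>
      if c = '+' then
        (pvInt? (pvALoop [] text.toList)).getD 0   -- none = ValueError, excluded by Pre_
      else 0

-- ===== PORT B =====
def parse_shipping_alt (text : String) : Int :=
  if PySem.Str.startswith text "+" then
    -- text.split(' ', 1)[0] = the prefix of text before the first space (exact)
    let head := text.toList.takeWhile (fun c => c ≠ ' ')
    -- for c in reversed(head): accumulate cents with a running place-value multiplier
    let r := head.reverse.foldl
      (fun (cp : Int × Int) c =>
        if c ∈ "0123456789".toList then (cp.1 + ((c.toNat : Int) - 48) * cp.2, cp.2 * 10)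
        else cp) (0, 1)
    r.1
  else 0

-- ===== PRECONDITION & SPEC =====
-- Pre_ excludes exactly the inputs on which A raises: the empty string (IndexError on text[0]),
-- and strings starting with '+' whose part before the first space has no digit (int('') → ValueError).
def Pre_parse_shipping (text : String) : Prop :=
  text.toList ≠ [] ∧
  (text.toList.head? = some '+' →
    (text.toList.takeWhile (fun c => c ≠ ' ')).any (fun c => c ∈ "0123456789".toList) = true)
instance (text : String) : Decidable (Pre_parse_shipping text) := by unfold Pre_parse_shipping; infer_instance

def pvWitness_parse_shipping : String := "+$5.99 shipping"

def Spec_parse_shipping (text : String) (out : Int) : Prop := out = parse_shipping_alt text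
instance (text : String) (out : Int) : Decidable (Spec_parse_shipping text out) := by unfold Spec_parse_shipping; infer_instance

-- ===== CLAIM (what is proved, stated in full; the proofs are below) =====
def Claim_equal_parse_shipping : Prop := ∀ (text : String), Dom_parse_shipping text → Pre_parse_shipping text → Spec_parse_shipping text (parse_shipping text)

-- ===== LEMMAS AND PROOFS =====

-- A's loop collects exactly the digits of the prefix before the first space
theorem pvALoop_eq (cs acc : List Char) :
    pvALoop acc cs = acc ++ (cs.takeWhile (fun c => c ≠ ' ')).filter (fun c => c ∈ "1234567890".toList) := by
  induction cs generalizing acc with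
  | nil => simp [pvALoop]
  | cons c rest ih =>
    by_cases hd : c ∈ "1234567890".toList
    · simp at hd
      rcases hd with rfl|rfl|rfl|rfl|rfl|rfl|rfl|rfl|rfl|rfl <;>
        simp [pvALoop, ih]
    · have h1 : ¬(c = '1' ∨ c = '2' ∨ c = '3' ∨ c = '4' ∨ c = '5' ∨ c = '6' ∨ c = '7' ∨ c = '8' ∨ c = '9' ∨ c = '0') := by
        simpa using hd
      by_cases hsp : c = ' '
      · subst hsp; simp [pvALoop]
      · simp [pvALoop, h1, hsp, ih]

-- the two digit strings "1234567890" and "0123456789" filter the same characters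
theorem pvDigits_comm (l : List Char) :
    l.filter (fun c => c ∈ "0123456789".toList) = l.filter (fun c => c ∈ "1234567890".toList) :=
  List.filter_congr (fun c _ => by rw [Bool.eq_iff_iff]; simp; tauto)

-- A's decimal conversion with a seed: the seed is shifted by 10^length
theorem pvHorner_acc (ds : List Char) (a : Int) :
    ds.foldl (fun a c => a * 10 + ((c.toNat : Int) - 48)) a
      = a * 10 ^ ds.length + ds.foldl (fun a c => a * 10 + ((c.toNat : Int) - 48)) 0 := by
  induction ds generalizing a with
  | nil => simp
  | cons c rest ih =>
    simp only [List.foldl_cons, List.length_cons]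
    rw [ih (a * 10 + ((c.toNat : Int) - 48)), ih (0 * 10 + ((c.toNat : Int) - 48))]
    ring

-- B's reversed place-value fold computes (decimal value of the digits, 10^#digits)
theorem pvBLoop_eq (l : List Char) :
    l.reverse.foldl
      (fun (cp : Int × Int) c =>
        if c ∈ "0123456789".toList then (cp.1 + ((c.toNat : Int) - 48) * cp.2, cp.2 * 10)
        else cp) (0, 1)
      = ((l.filter (fun c => c ∈ "0123456789".toList)).foldl
            (fun a c => a * 10 + ((c.toNat : Int) - 48)) 0,
         10 ^ (l.filter (fun c => c ∈ "0123456789".toList)).length) := by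
  rw [List.foldl_reverse]
  induction l with
  | nil => simp
  | cons c rest ih =>
    by_cases hd : c ∈ "0123456789".toList
    · simp only [List.foldr_cons, ih, List.filter_cons, hd, decide_true, if_true,
        List.foldl_cons, List.length_cons]
      rw [pvHorner_acc _ (0 * 10 + ((c.toNat : Int) - 48)), Prod.mk.injEq]
      exact ⟨by ring, by ring⟩
    · simp only [List.foldr_cons, ih, List.filter_cons, hd, decide_false,
        Bool.false_eq_true, if_false]

-- ===== VERDICT (by name: the statements are the Claim_ definitions above) =====
theorem parse_shipping_spec : Claim_equal_parse_shipping := by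
  intro text _ hpre
  unfold Spec_parse_shipping parse_shipping parse_shipping_alt
  obtain ⟨hne, hdig⟩ := hpre
  have hpl : "+".toList = ['+'] := rfl
  cases h : text.toList with
  | nil => exact absurd h hne
  | cons c rest =>
    have hget : PySem.Str.pyGet? text 0 = some c := by simp [h]
    rw [hget]
    by_cases hp : c = '+'
    · have hsw : PySem.Str.startswith text "+" = true := by
        rw [PySem.Str.startswith_eq, PySem.Chars.startswith_iff, h, hpl]
        subst hp; exact ⟨rest, rfl⟩
      have hany := hdig (by rw [h, hp]; rfl)
      simp only [hsw, if_true]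
      rw [pvALoop_eq, List.nil_append, ← pvDigits_comm, pvBLoop_eq]
      have hfne : (text.toList.takeWhile (fun c => c ≠ ' ')).filter
          (fun c => c ∈ "0123456789".toList) ≠ [] := by
        rw [Ne, List.filter_eq_nil_iff]
        intro hall
        rw [List.any_eq_true] at hany
        obtain ⟨x, hx, hxd⟩ := hany
        exact absurd hxd (by simpa using hall x hx)
      rw [h] at hfne
      rw [pvInt?, if_neg hfne, Option.getD_some, if_pos hp]
    · have hsw : PySem.Str.startswith text "+" = false := by
        rw [PySem.Str.startswith_eq]
        by_contra hc
        rw [Bool.not_eq_false, PySem.Chars.startswith_iff, h, hpl,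
          List.cons_prefix_cons] at hc
        exact hp hc.1.symm
      simp only [hsw, Bool.false_eq_true, if_false]
      rw [if_neg hp]
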